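-- pv_equiv track=rewrite | github.com/thatlq1812/chart_analysis_ai_v3 | scripts/pipeline/demo_full_pipeline.py | remap_element_types
-- ===== SOURCE A (Python) =====
-- def remap_element_types(elements: list, chart_type: str) -> list:
--     """
--     Remap detected element types based on chart classification.
--
--     Element detector may misclassify elements (e.g., detect bars as points).
--     This function corrects based on the known chart type.
--     """
--     # Define expected element types per chart type
--     type_mapping = {
--         "bar": "bar",
--         "histogram": "bar",
--         "line": "point",
--         "scatter": "point",
--         "area": "point",
--         "pie": "slice",
--         "box": "box",
--         "heatmap": "cell",
--     }
--
--     expected_type = type_mapping.get(chart_type, None)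
--
--     if not expected_type:
--         return elements
--
--     remapped = []
--     for elem in elements:
--         elem_copy = elem.copy()
--         original_type = elem.get("type", "unknown")
--
--         # For pie charts, remap bars to slices
--         if chart_type == "pie" and original_type in ["bar", "point"]:
--             elem_copy["type"] = "slice"
--             elem_copy["original_type"] = original_type
--
--         # For line/scatter, remap bars to points
--         elif chart_type in ["line", "scatter", "area"] and original_type == "bar":
--             elem_copy["type"] = "point"
--             elem_copy["original_type"] = original_type
--
--         # For bar/histogram, keep bars
--         elif chart_type in ["bar", "histogram"]:
--             if original_type == "point":
--                 # Small rectangles might be detected as points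
--                 elem_copy["type"] = "bar"
--                 elem_copy["original_type"] = original_type
--
--         remapped.append(elem_copy)
--
--     return remapped
-- ===== SOURCE B (Python) =====
-- _VALID = {"bar", "histogram", "line", "scatter", "area", "pie", "box", "heatmap"}
-- _REMAP = {
--     "pie": {"bar": "slice", "point": "slice"},
--     "line": {"bar": "point"},
--     "scatter": {"bar": "point"},
--     "area": {"bar": "point"},
--     "bar": {"point": "bar"},
--     "histogram": {"point": "bar"},
-- }
--
--
-- def _apply(elem, remap):
--     t = elem.get("type", "unknown")
--     if t not in remap:
--         return dict(elem)
--     return {**elem, "type": remap[t], "original_type": t}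
--
--
-- def remap_element_types(elements: list, chart_type: str) -> list:
--     if chart_type not in _VALID:
--         return elements
--     remap = _REMAP.get(chart_type, {})
--     return [_apply(elem, remap) for elem in elements]
-- ===== Notes on version B (the rewrite author's own statement) =====
-- stated objective: simpler
-- what changed: Replaces A's per-element if/elif chain over chart-type groups with a precomputed nested remap table (chart_type -> {original_type: new_type}) plus a valid-type set, applied by a single table lookup per element in a list comprehension.
import Mathlib
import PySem

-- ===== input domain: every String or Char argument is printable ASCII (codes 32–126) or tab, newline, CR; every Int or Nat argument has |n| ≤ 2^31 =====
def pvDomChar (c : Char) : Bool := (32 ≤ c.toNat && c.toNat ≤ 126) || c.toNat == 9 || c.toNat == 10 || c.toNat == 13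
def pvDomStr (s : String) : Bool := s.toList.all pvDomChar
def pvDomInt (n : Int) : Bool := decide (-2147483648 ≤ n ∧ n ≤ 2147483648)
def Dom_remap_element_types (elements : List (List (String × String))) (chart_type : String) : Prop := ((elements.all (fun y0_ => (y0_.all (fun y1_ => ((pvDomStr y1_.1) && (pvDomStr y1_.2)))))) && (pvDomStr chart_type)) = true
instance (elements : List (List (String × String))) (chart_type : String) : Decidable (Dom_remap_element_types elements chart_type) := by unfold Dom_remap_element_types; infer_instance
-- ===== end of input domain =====

-- B replaces A's per-element if/elif chain by a precomputed nested remap table and a map (objective: simpler).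

-- ===== PORT A =====
def remap_element_types (elements : List (List (String × String))) (chart_type : String) : List (List (String × String)) :=
  let type_mapping : PySem.Dict String String := PySem.Dict.mk
    [("bar", "bar"), ("histogram", "bar"), ("line", "point"), ("scatter", "point"),
     ("area", "point"), ("pie", "slice"), ("box", "box"), ("heatmap", "cell")]
  match PySem.Dict.get? type_mapping chart_type with  -- expected_type; 'if not expected_type' ≡ none (all values nonempty)
  | none => elements
  | some _ =>
    elements.foldl (fun remapped elem =>
      let d := PySem.Dict.mk elem
      let original_type := PySem.Dict.getD d "type" "unknown"
      let elem_copy :=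
        if chart_type == "pie" && (original_type == "bar" || original_type == "point") then
          ((d.insert "type" "slice").insert "original_type" original_type).items
        else if (chart_type == "line" || chart_type == "scatter" || chart_type == "area") && original_type == "bar" then
          ((d.insert "type" "point").insert "original_type" original_type).items
        else if chart_type == "bar" || chart_type == "histogram" then
          if original_type == "point" then
            ((d.insert "type" "bar").insert "original_type" original_type).items
          else elem
        else elem
      remapped ++ [elem_copy]) []

-- ===== PORT B =====
def pvValidTypes : List String := ["bar", "histogram", "line", "scatter", "area", "pie", "box", "heatmap"]

def pvRemapTable : PySem.Dict String (PySem.Dict String String) := PySem.Dict.mk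
  [("pie", PySem.Dict.mk [("bar", "slice"), ("point", "slice")]),
   ("line", PySem.Dict.mk [("bar", "point")]),
   ("scatter", PySem.Dict.mk [("bar", "point")]),
   ("area", PySem.Dict.mk [("bar", "point")]),
   ("bar", PySem.Dict.mk [("point", "bar")]),
   ("histogram", PySem.Dict.mk [("point", "bar")])]

def pvApplyRemap (elem : List (String × String)) (remap : PySem.Dict String String) : List (String × String) :=
  let d := PySem.Dict.mk elem
  let t := PySem.Dict.getD d "type" "unknown"
  match PySem.Dict.get? remap t with
  | none => elem
  | some v => ((d.insert "type" v).insert "original_type" t).items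

def remap_element_types_alt (elements : List (List (String × String))) (chart_type : String) : List (List (String × String)) :=
  if !(pvValidTypes.contains chart_type) then elements
  else
    let remap := PySem.Dict.getD pvRemapTable chart_type (PySem.Dict.mk [])
    elements.map (fun elem => pvApplyRemap elem remap)

-- ===== PRECONDITION & SPEC =====
def Spec_remap_element_types (elements : List (List (String × String))) (chart_type : String) (out : List (List (String × String))) : Prop := out = remap_element_types_alt elements chart_type
instance (elements : List (List (String × String))) (chart_type : String) (out : List (List (String × String))) : Decidable (Spec_remap_element_types elements chart_type out) := by unfold Spec_remap_element_types; infer_instance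

-- ===== CLAIM (what is proved, stated in full; the proofs are below) =====
def Claim_equal_remap_element_types : Prop := ∀ (elements : List (List (String × String))) (chart_type : String), Dom_remap_element_types elements chart_type → Spec_remap_element_types elements chart_type (remap_element_types elements chart_type)

-- ===== LEMMAS AND PROOFS =====
lemma pv_flatten_map_singleton {α β : Type} (f : α → List β) (l : List α) :
    (l.map (fun x => [f x])).flatten = l.map f := by
  induction l with
  | nil => rfl
  | cons x xs ih => simp [ih]

-- ===== VERDICT (by name: the statement is the Claim_ definition above) =====
theorem remap_element_types_spec : Claim_equal_remap_element_types := by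
  intro elements chart_type _
  unfold Spec_remap_element_types
  by_cases h : chart_type ∈ pvValidTypes
  · simp only [pvValidTypes, List.mem_cons, List.not_mem_nil, or_false] at h
    rcases h with h | h | h | h | h | h | h | h <;> subst h <;>
      simp [remap_element_types, remap_element_types_alt, pvValidTypes, pvRemapTable,
        PySem.Dict.get?_mk_cons, PySem.Dict.getD_eq_get?_getD] <;>
      rw [pv_flatten_map_singleton] <;>
      refine List.map_congr_left fun elem _ => ?_ <;>
      have hemp : ∀ (ν : Type) (t : String),
          PySem.Dict.get? (PySem.Dict.mk ([] : List (String × ν))) t = none := fun _ _ => rfl <;>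
      by_cases hb : (PySem.Dict.get? (PySem.Dict.mk elem) "type").getD "unknown" = "bar" <;>
      by_cases hp : (PySem.Dict.get? (PySem.Dict.mk elem) "type").getD "unknown" = "point" <;>
      first
        | simp [pvApplyRemap, PySem.Dict.getD_eq_get?_getD, PySem.Dict.get?_mk_cons,
            hb, hp, Ne.symm hb, Ne.symm hp, hemp]
        | simp [pvApplyRemap, PySem.Dict.getD_eq_get?_getD, PySem.Dict.get?_mk_cons,
            hb, hp, Ne.symm hb, hemp]
        | simp [pvApplyRemap, PySem.Dict.getD_eq_get?_getD, PySem.Dict.get?_mk_cons,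
            hb, hp, hemp]
  · have h' : pvValidTypes.contains chart_type = false := by
      simpa [List.contains_iff_mem] using h
    simp only [pvValidTypes, List.mem_cons, List.not_mem_nil, or_false, not_or] at h
    obtain ⟨h1, h2, h3, h4, h5, h6, h7, h8⟩ := h
    simp [remap_element_types, remap_element_types_alt, h', PySem.Dict.get?_mk_cons, PySem.Dict.get?,
      Ne.symm h1, Ne.symm h2, Ne.symm h3, Ne.symm h4, Ne.symm h5, Ne.symm h6, Ne.symm h7, Ne.symm h8]
    intro hmem
    simp [pvValidTypes, h1, h2, h3, h4, h5, h6, h7, h8] at hmem
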